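-- pv_equiv track=rewrite | github.com/majorWallet/guide_to_datastructure_and_algorithms | 12-1.py | add_until_100
-- ===== SOURCE A (Python) =====
-- def add_until_100(array):
--     if len(array) == 0:
--         return 0
--     chk_100 = add_until_100(array[1:])
--     if array[0] + chk_100 > 100:
--         return chk_100
--     else:
--         return array[0] + chk_100
-- ===== SOURCE B (Python) =====
-- def add_until_100(array):
--     acc = 0
--     for x in reversed(array):
--         if x + acc > 100:
--             continue
--         acc += x
--     return acc
-- ===== Notes on version B (the rewrite author's own statement) =====
-- stated objective: simpler
-- what changed: Replaces A's recursion with slicing (O(n^2) copies, recursion-depth limited) by a single iterative reverse loop with an accumulator.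
import Mathlib
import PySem

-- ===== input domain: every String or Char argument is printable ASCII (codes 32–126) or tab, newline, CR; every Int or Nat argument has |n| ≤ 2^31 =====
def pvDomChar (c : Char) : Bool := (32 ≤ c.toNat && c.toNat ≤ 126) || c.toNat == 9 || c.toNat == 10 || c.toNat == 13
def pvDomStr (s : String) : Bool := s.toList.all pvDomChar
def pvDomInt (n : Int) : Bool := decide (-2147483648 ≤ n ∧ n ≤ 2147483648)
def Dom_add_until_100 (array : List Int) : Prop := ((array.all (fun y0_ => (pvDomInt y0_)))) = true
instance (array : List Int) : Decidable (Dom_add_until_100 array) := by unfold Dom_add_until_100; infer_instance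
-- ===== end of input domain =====

-- ===== PORT A =====
-- B: iterative reverse-loop accumulator instead of A's slicing recursion (return value equivalent).
def add_until_100 (array : List Int) : Int :=
  match array with
  | [] => 0
  | x :: rest =>
      let chk_100 := add_until_100 rest
      if x + chk_100 > 100 then chk_100 else x + chk_100

-- ===== PORT B =====
def add_until_100_alt (array : List Int) : Int :=
  array.reverse.foldl (fun acc x => if x + acc > 100 then acc else acc + x) 0

-- ===== PRECONDITION & SPEC =====
def Spec_add_until_100 (array : List Int) (out : Int) : Prop := out = add_until_100_alt array
instance (array : List Int) (out : Int) : Decidable (Spec_add_until_100 array out) := by unfold Spec_add_until_100; infer_instance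

-- ===== CLAIM (what is proved, stated in full; the proofs are below) =====
def Claim_equal_add_until_100 : Prop := ∀ (array : List Int), Dom_add_until_100 array → Spec_add_until_100 array (add_until_100 array)

-- ===== LEMMAS AND PROOFS =====

-- ===== VERDICT (by name: the statement is the Claim_ definition above) =====
theorem foldl_reverse_eq (array : List Int) :
    array.reverse.foldl (fun acc x => if x + acc > 100 then acc else acc + x) 0
      = add_until_100 array := by
  induction array with
  | nil => rfl
  | cons x xs ih =>
    simp only [List.reverse_cons, List.foldl_append, List.foldl_cons, List.foldl_nil, ih,
      add_until_100]
    split_ifs with h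
    · rfl
    · omega

theorem add_until_100_spec : Claim_equal_add_until_100 := by
  intro array _
  unfold Spec_add_until_100 add_until_100_alt
  exact (foldl_reverse_eq array).symm
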